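-- pv_equiv track=rewrite | github.com/jeewoo1025/Summer_Coding | mobis_210827/num1.py | solution
-- ===== SOURCE A (Python) =====
-- def getCount(dice, obj):  # 배열, 숫자
--     total = 0
--     for i in range(len(dice)):
--         if obj in dice[i]:
--             total += 1
--     return total
--
-- def solution(dice):
--     for i in range(1, len(dice)+1):  # 1 ~ N
--         if getCount(dice, 0) < (i-1):
--             return int('1'+'0'*(i-1))
--
--         for j in range(1, 10):
--             if getCount(dice, j) < i:
--                 return int(str(j)*i)
--     return 10000
-- ===== SOURCE B (Python) =====
-- def solution(dice):
--     n = len(dice)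
--
--     def count(d):
--         return sum(1 for die in dice if d in die)
--
--     # (smallest repetition length at which digit d becomes unformable, digit) per digit
--     thresholds = [(count(0) + 2, 0)] + [(count(j) + 1, j) for j in range(1, 10)]
--     best = thresholds[0]
--     for t in thresholds[1:]:
--         if t < best:
--             best = t
--     i, d = best
--     if i > n:
--         return 10000
--     return int('1' + '0' * (i - 1)) if d == 0 else int(str(d) * i)
-- ===== Notes on version B (the rewrite author's own statement) =====
-- stated objective: faster
-- what changed: Replaces A's increasing-length outer scan that recomputes getCount for every candidate length and digit with one pass of per-digit counts, a direct per-digit trigger-length computation, and a single lexicographic minimum over the ten (length, digit) candidates.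
import Mathlib
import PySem

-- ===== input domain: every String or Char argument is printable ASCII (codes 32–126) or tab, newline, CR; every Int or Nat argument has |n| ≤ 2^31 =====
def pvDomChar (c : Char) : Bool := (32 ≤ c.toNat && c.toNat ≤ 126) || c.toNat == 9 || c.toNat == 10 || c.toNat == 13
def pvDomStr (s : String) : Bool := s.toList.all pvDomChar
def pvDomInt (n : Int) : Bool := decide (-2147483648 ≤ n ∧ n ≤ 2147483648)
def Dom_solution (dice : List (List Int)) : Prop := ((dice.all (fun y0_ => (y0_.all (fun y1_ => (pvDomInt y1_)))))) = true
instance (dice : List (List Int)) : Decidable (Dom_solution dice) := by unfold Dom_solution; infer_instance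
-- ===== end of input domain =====

-- B replaces A's nested increasing-length rescan by ten one-pass counts, a per-digit
-- trigger-length computation and one lexicographic minimum (same return value).

-- shared value builder: int(str(d)*k) for a digit d (both Pythons build this string literally)
def digitRepInt (d : Int) (k : Int) : Int :=
  (PySem.Int.ofChars? (List.replicate k.toNat (Char.ofNat (48 + d.toNat)))).getD 0

-- shared value builder: int('1' + '0'*k)
def oneZerosInt (k : Int) : Int :=
  (PySem.Int.ofChars? ('1' :: List.replicate k.toNat '0')).getD 0

-- ===== PORT A =====
def getCount (dice : List (List Int)) (obj : Int) : Int :=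
  (PySem.List.pyRange 0 (dice.length : Int) 1).foldl
    (fun total i => if obj ∈ PySem.List.pyGetD dice i [] then total + 1 else total) 0

def solInner (dice : List (List Int)) (i : Int) : List Int → Option Int
  | [] => none
  | j :: js => if getCount dice j < i then some (digitRepInt j i) else solInner dice i js

def solOuter (dice : List (List Int)) : List Int → Int
  | [] => 10000
  | i :: is =>
    if getCount dice 0 < i - 1 then oneZerosInt (i - 1)
    else
      match solInner dice i (PySem.List.pyRange 1 10 1) with
      | some v => v
      | none => solOuter dice is

def solution (dice : List (List Int)) : Int :=
  solOuter dice (PySem.List.pyRange 1 ((dice.length : Int) + 1) 1)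

-- ===== PORT B =====
def countAlt (dice : List (List Int)) (d : Int) : Int :=
  dice.foldl (fun acc die => if d ∈ die then acc + 1 else acc) 0

def solution_alt (dice : List (List Int)) : Int :=
  let n : Int := dice.length
  let thresholds : List (Int × Int) :=
    (countAlt dice 0 + 2, 0) ::
      (PySem.List.pyRange 1 10 1).map (fun j => (countAlt dice j + 1, j))
  let best :=
    (PySem.List.slice thresholds (some 1) none).foldl
      (fun b t => if t.1 < b.1 ∨ (t.1 = b.1 ∧ t.2 < b.2) then t else b)
      (PySem.List.pyGetD thresholds 0 (0, 0))
  if best.1 > n then 10000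
  else if best.2 = 0 then oneZerosInt (best.1 - 1) else digitRepInt best.2 best.1

-- ===== PRECONDITION & SPEC =====
def Spec_solution (dice : List (List Int)) (out : Int) : Prop := out = solution_alt dice
instance (dice : List (List Int)) (out : Int) : Decidable (Spec_solution dice out) := by unfold Spec_solution; infer_instance

-- ===== CLAIM (what is proved, stated in full; the proofs are below) =====
def Claim_equal_solution : Prop := ∀ (dice : List (List Int)), Dom_solution dice → Spec_solution dice (solution dice)

-- ===== LEMMAS AND PROOFS =====

def pvLexFold (b : Int × Int) (l : List (Int × Int)) : Int × Int :=
  l.foldl (fun b t => if t.1 < b.1 ∨ (t.1 = b.1 ∧ t.2 < b.2) then t else b) b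

def pvT (dice : List (List Int)) : List (Int × Int) :=
  (countAlt dice 0 + 2, 0) ::
    (PySem.List.pyRange 1 10 1).map (fun j => (countAlt dice j + 1, j))

lemma getCount_eq (dice : List (List Int)) (obj : Int) :
    getCount dice obj = countAlt dice obj := by
  unfold getCount countAlt
  exact PySem.List.foldl_pyRange_zero_pyGetD' dice []
    (fun total die => if obj ∈ die then total + 1 else total) 0

lemma countAlt_le_aux (dice : List (List Int)) (d : Int) (a : Int) :
    a ≤ dice.foldl (fun acc die => if d ∈ die then acc + 1 else acc) a := by
  induction dice generalizing a with
  | nil => simp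
  | cons die rest ih =>
    simp only [List.foldl]
    refine le_trans ?_ (ih _)
    split_ifs <;> omega

lemma countAlt_nonneg (dice : List (List Int)) (d : Int) : 0 ≤ countAlt dice d :=
  countAlt_le_aux dice d 0

lemma lexFold_mem (b : Int × Int) (l : List (Int × Int)) :
    pvLexFold b l = b ∨ pvLexFold b l ∈ l := by
  induction l generalizing b with
  | nil => left; rfl
  | cons t rest ih =>
    unfold pvLexFold at *
    simp only [List.foldl]
    rcases ih (if t.1 < b.1 ∨ (t.1 = b.1 ∧ t.2 < b.2) then t else b) with h | h
    · rw [h]; split_ifs with hc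
      · right; simp
      · left; rfl
    · right; simp [h]

lemma lexFold_eq (b x : Int × Int) (l : List (Int × Int))
    (hx : x = b ∨ x ∈ l)
    (hmin : ∀ t, (t = b ∨ t ∈ l) → t = x ∨ (x.1 < t.1 ∨ (x.1 = t.1 ∧ x.2 < t.2))) :
    pvLexFold b l = x := by
  induction l generalizing b with
  | nil =>
    rcases hx with rfl | h
    · rfl
    · simp at h
  | cons t rest ih =>
    unfold pvLexFold at *
    simp only [List.foldl]
    set b' := if t.1 < b.1 ∨ (t.1 = b.1 ∧ t.2 < b.2) then t else b with hb'
    have hmin' : ∀ s, (s = b' ∨ s ∈ rest) →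
        s = x ∨ (x.1 < s.1 ∨ (x.1 = s.1 ∧ x.2 < s.2)) := by
      intro s hs
      rcases hs with rfl | hs
      · rw [hb']; split_ifs with hc
        · exact hmin t (Or.inr (List.mem_cons_self))
        · exact hmin b (Or.inl rfl)
      · exact hmin s (Or.inr (List.mem_cons_of_mem _ hs))
    apply ih b'
    · rcases hx with rfl | hx
      · -- x = b
        rw [hb']; split_ifs with hc
        · -- t strictly lex-below b: then hmin at t forces t = b or b lex-below t; contradiction unless t = b
          rcases hmin t (Or.inr List.mem_cons_self) with rfl | hlt
          · left; rfl
          · exfalso; rcases hc with h1 | ⟨h1, h2⟩ <;> rcases hlt with h3 | ⟨h3, h4⟩ <;> omega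
        · left; rfl
      · rcases List.mem_cons.mp hx with rfl | hx
      -- x = t
        · rw [hb']; split_ifs with hc
          · left; rfl
          · rcases hmin b (Or.inl rfl) with rfl | hlt
            · left; rfl
            · exfalso
              rcases hlt with h1 | ⟨h1, h2⟩ <;>
                simp only [not_or, not_lt, not_and] at hc <;> omega
        · right; exact hx
    · exact hmin'

-- membership shape of pvT
lemma pvT_mem (dice : List (List Int)) (t : Int × Int) (ht : t ∈ pvT dice) :
    t = (countAlt dice 0 + 2, 0) ∨
      ∃ j : Int, 1 ≤ j ∧ j ≤ 9 ∧ t = (countAlt dice j + 1, j) := by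
  unfold pvT at ht
  rcases List.mem_cons.mp ht with rfl | ht
  · exact Or.inl rfl
  · right
    rcases List.mem_map.mp ht with ⟨j, hj, rfl⟩
    rw [PySem.List.mem_pyRange_one] at hj
    exact ⟨j, by omega, by omega, rfl⟩

lemma mem_pvT_digit (dice : List (List Int)) (j : Int) (h1 : 1 ≤ j) (h9 : j ≤ 9) :
    (countAlt dice j + 1, j) ∈ pvT dice := by
  unfold pvT
  exact List.mem_cons_of_mem _
    (List.mem_map.mpr ⟨j, PySem.List.mem_pyRange_one.mpr ⟨h1, by omega⟩, rfl⟩)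

-- solution_alt written through pvLexFold / pvT
lemma solution_alt_form (dice : List (List Int)) :
    solution_alt dice =
      (if (pvLexFold (pvT dice).headI (pvT dice).tail).1 > (dice.length : Int) then 10000
       else if (pvLexFold (pvT dice).headI (pvT dice).tail).2 = 0 then
         oneZerosInt ((pvLexFold (pvT dice).headI (pvT dice).tail).1 - 1)
       else digitRepInt (pvLexFold (pvT dice).headI (pvT dice).tail).2
         (pvLexFold (pvT dice).headI (pvT dice).tail).1) := by
  unfold solution_alt pvLexFold pvT
  simp only [PySem.List.slice_from_one, PySem.List.pyGetD_zero_cons, List.tail_cons,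
    List.headI]

-- characterization: if x is the unique lex-minimum of pvT, solution_alt returns its value
lemma solution_alt_of_min (dice : List (List Int)) (x : Int × Int)
    (hx : x ∈ pvT dice)
    (hmin : ∀ t, t ∈ pvT dice → t = x ∨ (x.1 < t.1 ∨ (x.1 = t.1 ∧ x.2 < t.2))) :
    solution_alt dice =
      (if x.1 > (dice.length : Int) then 10000
       else if x.2 = 0 then oneZerosInt (x.1 - 1) else digitRepInt x.2 x.1) := by
  have hfold : pvLexFold (pvT dice).headI (pvT dice).tail = x := by
    apply lexFold_eq
    · unfold pvT at hx ⊢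
      rcases List.mem_cons.mp hx with rfl | hx
      · left; rfl
      · right; exact hx
    · intro t ht
      apply hmin
      unfold pvT at ht ⊢
      rcases ht with rfl | ht
      · exact List.mem_cons_self
      · exact List.mem_cons_of_mem _ ht
  rw [solution_alt_form, hfold]

-- the invariant carried by A's outer loop: no digit has triggered before length k
def pvInv (dice : List (List Int)) (k : Int) : Prop :=
  (∀ t, t ∈ pvT dice → k ≤ t.1)

lemma inner_main (dice : List (List Int)) (k : Int)
    (hkN : k ≤ (dice.length : Int)) (hInv : pvInv dice k)
    (h0 : k + 1 ≤ countAlt dice 0 + 2) :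
    ∀ (m : Nat) (j0 : Int), 1 ≤ j0 → j0 ≤ 10 → (10 - j0).toNat = m →
    (∀ j : Int, 1 ≤ j → j < j0 → k + 1 ≤ countAlt dice j + 1) →
    (match solInner dice k (PySem.List.pyRange j0 10 1) with
     | some v => solution_alt dice = v
     | none => ∀ j : Int, 1 ≤ j → j ≤ 9 → k + 1 ≤ countAlt dice j + 1) := by
  intro m
  induction m with
  | zero =>
    intro j0 h1 h10 hm hpre
    have hj0 : j0 = 10 := by omega
    subst hj0
    rw [PySem.List.pyRange_one_eq_nil (by omega)]
    simp only [solInner]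
    intro j hj1 hj9
    exact hpre j hj1 (by omega)
  | succ m ih =>
    intro j0 h1 h10 hm hpre
    have hlt : j0 < 10 := by omega
    rw [PySem.List.pyRange_one_cons hlt]
    simp only [solInner, getCount_eq]
    split_ifs with hc
    · -- digit j0 triggers at length k: it is the lex-minimum
      have hk : countAlt dice j0 + 1 = k := by
        have := hInv _ (mem_pvT_digit dice j0 h1 (by omega))
        simp at this; omega
      have := solution_alt_of_min dice (countAlt dice j0 + 1, j0)
        (mem_pvT_digit dice j0 h1 (by omega))
        (by
          intro t ht
          rcases pvT_mem dice t ht with rfl | ⟨j, hj1, hj9, rfl⟩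
          · right; left; simp; omega
          · rcases lt_trichotomy j j0 with h | h | h
            · have := hpre j hj1 h; right; left; simp; omega
            · left; rw [h]
            · have := hInv _ (mem_pvT_digit dice j hj1 hj9)
              simp at this
              rcases eq_or_lt_of_le this with he | hlt2
              · right; right; simp; omega
              · right; left; simp; omega)
      rw [this]
      rw [hk]
      rw [if_neg (by omega), if_neg (by omega)]
    · have := ih (j0 + 1) (by omega) (by omega) (by omega)
        (by intro j hj1 hjlt
            rcases lt_or_ge j j0 with h | h
            · exact hpre j hj1 h
            · have hj : j = j0 := by omega
              subst hj; omega)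
      exact this

lemma outer_main (dice : List (List Int)) :
    ∀ (m : Nat) (k : Int), 1 ≤ k → ((dice.length : Int) + 1 - k).toNat = m →
    pvInv dice k →
    solOuter dice (PySem.List.pyRange k ((dice.length : Int) + 1) 1) = solution_alt dice := by
  intro m
  induction m with
  | zero =>
    intro k hk1 hm hInv
    have hk : (dice.length : Int) + 1 ≤ k := by omega
    rw [PySem.List.pyRange_one_eq_nil hk]
    simp only [solOuter]
    -- every threshold exceeds the number of dice: B returns 10000 too
    have hbest := lexFold_mem (pvT dice).headI (pvT dice).tail
    have hmem : pvLexFold (pvT dice).headI (pvT dice).tail ∈ pvT dice := by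
      rcases hbest with h | h
      · rw [h]; unfold pvT; simp
      · unfold pvT at h ⊢; exact List.mem_cons_of_mem _ h
    have := hInv _ hmem
    rw [solution_alt_form, if_pos (by omega)]
  | succ m ih =>
    intro k hk1 hm hInv
    have hkN : k ≤ (dice.length : Int) := by omega
    rw [PySem.List.pyRange_one_cons (by omega)]
    simp only [solOuter, getCount_eq]
    split_ifs with hc
    · -- the all-zeros candidate triggers at length k
      have hk0 : countAlt dice 0 + 2 = k := by
        have := hInv (countAlt dice 0 + 2, 0) (by unfold pvT; simp)
        simp at this; omega
      have := solution_alt_of_min dice (countAlt dice 0 + 2, 0)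
        (by unfold pvT; simp)
        (by
          intro t ht
          rcases pvT_mem dice t ht with rfl | ⟨j, hj1, hj9, rfl⟩
          · left; rfl
          · have := hInv _ (mem_pvT_digit dice j hj1 hj9)
            simp at this
            rcases eq_or_lt_of_le this with he | hlt2
            · right; right; simp; omega
            · right; left; simp; omega)
      rw [this, hk0]
      rw [if_neg (by omega), if_pos rfl]
    · have h0 : k + 1 ≤ countAlt dice 0 + 2 := by omega
      have hin := inner_main dice k hkN hInv h0 9 1 (by omega) (by omega)
        (by omega) (by intro j hj1 hjlt; omega)
      cases hE : solInner dice k (PySem.List.pyRange 1 10 1) with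
      | some v =>
        rw [hE] at hin
        exact hin.symm
      | none =>
        rw [hE] at hin
        apply ih (k + 1) (by omega) (by omega)
        intro t ht
        rcases pvT_mem dice t ht with rfl | ⟨j, hj1, hj9, rfl⟩
        · simpa using h0
        · simpa using hin j hj1 hj9

-- ===== VERDICT (by name: the statement is the Claim_ definition above) =====
theorem solution_spec : Claim_equal_solution := by
  intro dice _
  unfold Spec_solution solution
  apply outer_main dice (dice.length) 1 (by omega) (by omega)
  intro t ht
  rcases pvT_mem dice t ht with rfl | ⟨j, hj1, hj9, rfl⟩
  · have := countAlt_nonneg dice 0; simp; omega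
  · have := countAlt_nonneg dice j; simp; omega
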